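-- pv_equiv track=rewrite | github.com/jeffles/adventofcode | 2024/23-14.py | tilt_east
-- ===== SOURCE A (Python) =====
-- def tilt_east(grid):
--     for y in range(len(grid)):
--         for x in range(len(grid[0])-2, -1, -1):
--             if grid[y][x] == "O" and grid[y][x+1] == '.':
--                 tx = x
--                 while tx < len(grid[0])-1 and grid[y][tx] == "O" and grid[y][tx+1] == '.':
--                     grid[y][tx], grid[y][tx+1] = grid[y][tx+1], grid[y][tx]
--                     tx += 1
--     return grid
-- ===== SOURCE B (Python) =====
-- def tilt_east(grid):
--     w = len(grid[0]) if grid else 0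
--     for row in grid:
--         out = []
--         dots = rocks = 0
--         for c in row[:w]:
--             if c == '.':
--                 dots += 1
--             elif c == 'O':
--                 rocks += 1
--             else:
--                 out += ['.'] * dots + ['O'] * rocks + [c]
--                 dots = rocks = 0
--         row[:w] = out + ['.'] * dots + ['O'] * rocks
--     return grid
-- ===== Notes on version B (the rewrite author's own statement) =====
-- stated objective: alternative
-- what changed: A bubble-slides each rock rightwards with a nested while over adjacent swaps, scanning columns right-to-left; B makes a single left-to-right pass per row, counting dots and rocks per wall-delimited segment and emitting each segment packed dots-then-rocks.
import Mathlib
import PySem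

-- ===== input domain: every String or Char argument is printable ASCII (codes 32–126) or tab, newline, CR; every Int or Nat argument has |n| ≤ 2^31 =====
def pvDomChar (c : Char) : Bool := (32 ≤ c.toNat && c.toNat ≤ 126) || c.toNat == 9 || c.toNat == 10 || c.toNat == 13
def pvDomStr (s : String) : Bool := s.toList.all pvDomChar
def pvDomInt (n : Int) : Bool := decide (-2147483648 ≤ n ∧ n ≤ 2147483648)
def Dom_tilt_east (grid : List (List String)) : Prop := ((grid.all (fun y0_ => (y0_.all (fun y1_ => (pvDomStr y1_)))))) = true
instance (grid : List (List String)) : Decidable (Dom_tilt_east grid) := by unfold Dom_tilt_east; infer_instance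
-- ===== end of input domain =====

-- B tilts each row by counting dots and rocks per wall-delimited segment in a single pass,
-- instead of A's nested adjacent-swap sliding.
-- Both Pythons mutate `grid` in place the same way; the theorems below are about the return value.

-- ===== PORT A =====
-- the simultaneous swap grid[y][tx], grid[y][tx+1] = grid[y][tx+1], grid[y][tx]
def pvSwap (row : List String) (tx : Nat) : List String :=
  (row.set tx (row.getD (tx+1) "")).set (tx+1) (row.getD tx "")

-- the inner `while tx < len(grid[0])-1 and …` loop (tx < w-1 written as tx+1 < w)
def pvWhile (w : Nat) (row : List String) (tx : Nat) : List String :=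
  if h : tx + 1 < w ∧ row.getD tx "" = "O" ∧ row.getD (tx+1) "" = "." then
    pvWhile w (pvSwap row tx) (tx+1)
  else row
termination_by w - tx
decreasing_by omega

-- the `for x in range(len(grid[0])-2, -1, -1)` loop; `pvXLoop w n` runs x = n-1, …, 0
def pvXLoop (w : Nat) : Nat → List String → List String
  | 0, row => row
  | n+1, row =>
      pvXLoop w n
        (if row.getD n "" = "O" ∧ row.getD (n+1) "" = "." then pvWhile w row n else row)

def tilt_east (grid : List (List String)) : List (List String) :=
  let w := (grid.headD []).length
  grid.map (fun row => pvXLoop w (w-1) row)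

-- ===== PORT B =====
-- out += ['.']*dots + ['O']*rocks (+ [c])
def pvFlush (out : List String) (d o : Nat) : List String :=
  out ++ List.replicate d "." ++ List.replicate o "O"

-- the left-to-right counting pass of Source B over one row prefix
def pvRowB (cells : List String) : List String :=
  let st := cells.foldl
    (fun (st : List String × Nat × Nat) c =>
      if c = "." then (st.1, st.2.1 + 1, st.2.2)
      else if c = "O" then (st.1, st.2.1, st.2.2 + 1)
      else (pvFlush st.1 st.2.1 st.2.2 ++ [c], 0, 0))
    ([], 0, 0)
  pvFlush st.1 st.2.1 st.2.2

def tilt_east_alt (grid : List (List String)) : List (List String) :=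
  let w := (grid.headD []).length
  grid.map (fun row => pvRowB (row.take w) ++ row.drop w)

-- ===== PRECONDITION & SPEC =====
-- a row on which some rock can slide past the row's right end (all dots after some "O")
def pvSlidable : List String → Bool
  | [] => false
  | c :: rest => (c == "O" && rest.all (· == ".")) || pvSlidable rest

-- Pre_ is exactly the set of inputs on which Python A returns normally: A indexes every row
-- up to width w = len(grid[0]) and raises IndexError iff some row is ≥ 2 cells shorter than w,
-- or exactly 1 cell shorter with a rock that slides off its end (when w ≥ 2).
def Pre_tilt_east (grid : List (List String)) : Prop :=
  ∀ row ∈ grid, (grid.headD []).length ≤ row.length ∨ (grid.headD []).length ≤ 1 ∨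
    (row.length + 1 = (grid.headD []).length ∧ pvSlidable row = false)
instance (grid : List (List String)) : Decidable (Pre_tilt_east grid) := by
  unfold Pre_tilt_east; infer_instance

def pvWitness_tilt_east : List (List String) :=
  [[".", "O", ".", "#", "O"], ["O", ".", "O", ".", "."]]

def Spec_tilt_east (grid : List (List String)) (out : List (List String)) : Prop := out = tilt_east_alt grid
instance (grid : List (List String)) (out : List (List String)) : Decidable (Spec_tilt_east grid out) := by unfold Spec_tilt_east; infer_instance

-- ===== CLAIM (what is proved, stated in full; the proofs are below) =====
def Claim_equal_tilt_east : Prop := ∀ (grid : List (List String)), Dom_tilt_east grid → Pre_tilt_east grid → Spec_tilt_east grid (tilt_east grid)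

-- ===== LEMMAS AND PROOFS =====

-- recursive form of Source B's counting pass, used only in the proofs
def packAux : List String → Nat → Nat → List String
  | [], d, o => List.replicate d "." ++ List.replicate o "O"
  | c :: rest, d, o =>
      if c = "." then packAux rest (d+1) o
      else if c = "O" then packAux rest d (o+1)
      else List.replicate d "." ++ List.replicate o "O" ++ c :: packAux rest 0 0

-- no "O" cell immediately followed by a "." cell
def pvSettled : List String → Prop
  | [] => True
  | c :: rest => ¬(c = "O" ∧ rest.headD "" = ".") ∧ pvSettled rest

theorem pvGetD_append_self (U l : List String) (d : String) :
    (U ++ l).getD U.length d = l.getD 0 d := by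
  simp [List.getD, List.getElem?_append_right]

theorem pvGetD_append_succ (U l : List String) (d : String) :
    (U ++ l).getD (U.length+1) d = l.getD 1 d := by
  have := List.getElem?_append_right (l₁ := U) (l₂ := l) (i := U.length+1) (by omega)
  simp [List.getD, this]

theorem pvGetD_append_lt (U l : List String) (i : Nat) (h : i < U.length) (d : String) :
    (U ++ l).getD i d = U.getD i d := by
  simp [List.getD, List.getElem?_append_left h]

theorem pvSet_append_lt (U l : List String) (i : Nat) (h : i < U.length) (v : String) :
    (U ++ l).set i v = U.set i v ++ l := by
  rw [List.set_append, if_pos h]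

theorem pvSet_append_self (U l : List String) (v : String) :
    (U ++ l).set U.length v = U ++ l.set 0 v := by
  rw [List.set_append, if_neg (by omega)]
  simp

theorem pvSet_append_succ (U l : List String) (v : String) :
    (U ++ l).set (U.length+1) v = U ++ l.set 1 v := by
  rw [List.set_append, if_neg (by omega)]
  have h : U.length + 1 - U.length = 1 := by omega
  rw [h]

theorem pvHeadD_drop (P : List String) (n : Nat) :
    (P.drop n).headD "" = P.getD n "" := by
  rw [List.headD_eq_head?, List.head?_drop]; rfl

theorem pvRowB_aux (cells : List String) : ∀ (out : List String) (d o : Nat),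
    (let st := cells.foldl (fun (st : List String × Nat × Nat) c =>
        if c = "." then (st.1, st.2.1 + 1, st.2.2)
        else if c = "O" then (st.1, st.2.1, st.2.2 + 1)
        else (pvFlush st.1 st.2.1 st.2.2 ++ [c], 0, 0)) (out, d, o)
     pvFlush st.1 st.2.1 st.2.2)
    = out ++ packAux cells d o := by
  induction cells with
  | nil => intro out d o; simp [pvFlush, packAux]
  | cons c rest ih =>
    intro out d o
    simp only [List.foldl_cons, packAux]
    by_cases h1 : c = "."
    · simp only [h1]
      exact ih out (d+1) o
    · by_cases h2 : c = "O"
      · simp only [h2, if_neg (by decide : ¬("O" : String) = ".")]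
        exact ih out d (o+1)
      · simp only [if_neg h1, if_neg h2]
        rw [ih (pvFlush out d o ++ [c]) 0 0]
        simp [pvFlush]

theorem pvRowB_eq_packAux (cells : List String) : pvRowB cells = packAux cells 0 0 := by
  have := pvRowB_aux cells [] 0 0
  simpa [pvRowB] using this

theorem pvWhile_length (w : Nat) (row : List String) (tx : Nat) :
    (pvWhile w row tx).length = row.length := by
  induction row, tx using pvWhile.induct w with
  | case1 row tx h ih => rw [pvWhile, dif_pos h, ih]; simp [pvSwap]
  | case2 row tx h => rw [pvWhile, dif_neg h]

theorem pvWhile_append (w : Nat) (n : Nat) : ∀ (P D : List String) (tx : Nat),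
    w - tx ≤ n → P.length = w → pvWhile w (P ++ D) tx = pvWhile w P tx ++ D := by
  induction n with
  | zero =>
    intro P D tx h hP
    conv_lhs => rw [pvWhile]
    conv_rhs => rw [pvWhile]
    rw [dif_neg (by rintro ⟨h1, -⟩; omega), dif_neg (by rintro ⟨h1, -⟩; omega)]
  | succ n ih =>
    intro P D tx h hP
    conv_lhs => rw [pvWhile]
    conv_rhs => rw [pvWhile]
    by_cases hc : tx + 1 < w ∧ P.getD tx "" = "O" ∧ P.getD (tx+1) "" = "."
    · have e1 : (P ++ D).getD tx "" = P.getD tx "" :=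
        pvGetD_append_lt P D tx (by omega) ""
      have e2 : (P ++ D).getD (tx+1) "" = P.getD (tx+1) "" :=
        pvGetD_append_lt P D (tx+1) (by omega) ""
      have hsw : pvSwap (P ++ D) tx = pvSwap P tx ++ D := by
        unfold pvSwap
        rw [e1, e2, pvSet_append_lt P D tx (by omega),
          pvSet_append_lt _ D (tx+1) (by simp; omega)]
      rw [dif_pos ⟨hc.1, by rw [e1]; exact hc.2.1, by rw [e2]; exact hc.2.2⟩, dif_pos hc, hsw]
      exact ih _ D (tx+1) (by omega) (by simp [pvSwap, hP])
    · rw [dif_neg hc, dif_neg]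
      rintro ⟨h1, h2, h3⟩
      exact hc ⟨h1, by rw [← pvGetD_append_lt P D tx (by omega) ""]; exact h2,
        by rw [← pvGetD_append_lt P D (tx+1) (by omega) ""]; exact h3⟩

theorem pvXLoop_append (w : Nat) : ∀ (n : Nat) (P D : List String),
    n < w → P.length = w → pvXLoop w n (P ++ D) = pvXLoop w n P ++ D := by
  intro n
  induction n with
  | zero => intro P D _ _; rfl
  | succ k ih =>
    intro P D hn hP
    have e1 : (P ++ D).getD k "" = P.getD k "" := pvGetD_append_lt P D k (by omega) ""
    have e2 : (P ++ D).getD (k+1) "" = P.getD (k+1) "" := pvGetD_append_lt P D (k+1) (by omega) ""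
    rw [pvXLoop, pvXLoop, e1, e2]
    by_cases hc : P.getD k "" = "O" ∧ P.getD (k+1) "" = "."
    · rw [if_pos hc, if_pos hc, pvWhile_append w w P D k (by omega) hP]
      exact ih _ D (by omega) (by rw [pvWhile_length]; exact hP)
    · rw [if_neg hc, if_neg hc]; exact ih P D (by omega) hP

theorem pvWhile_spec (w : Nat) (ds : List String) : ∀ (U rest : List String),
    (∀ c ∈ ds, c = ".") → rest.headD "" ≠ "." →
    U.length + 1 + ds.length + rest.length ≤ w →
    pvWhile w (U ++ "O" :: (ds ++ rest)) U.length = U ++ ds ++ "O" :: rest := by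
  induction ds with
  | nil =>
    intro U rest _ hrest hw
    rw [pvWhile, dif_neg]
    · simp
    rintro ⟨h1, -, h3⟩
    cases rest with
    | nil =>
      rw [List.nil_append, pvGetD_append_succ U ["O"] ""] at h3
      simp [List.getD] at h3
    | cons r rs =>
      rw [List.nil_append, pvGetD_append_succ U ("O" :: r :: rs) ""] at h3
      simp [List.getD] at h3
      exact hrest (by simpa using h3)
  | cons c ds' ih =>
    intro U rest hds hrest hw
    have hc : c = "." := hds c (by simp)
    subst hc
    have hw2 : U.length + 1 + (ds'.length + 1) + rest.length ≤ w := by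
      simpa using hw
    have hO : (U ++ "O" :: ("." :: ds' ++ rest)).getD U.length "" = "O" := by
      rw [pvGetD_append_self]; rfl
    have hdot : (U ++ "O" :: ("." :: ds' ++ rest)).getD (U.length+1) "" = "." := by
      rw [pvGetD_append_succ]; rfl
    rw [pvWhile, dif_pos ⟨by omega, hO, hdot⟩]
    have hsw : pvSwap (U ++ "O" :: ("." :: ds' ++ rest)) U.length
        = (U ++ ["."]) ++ "O" :: (ds' ++ rest) := by
      unfold pvSwap
      rw [hO, hdot, pvSet_append_self, pvSet_append_succ]
      simp
    rw [hsw]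
    have hlen1 : U.length + 1 = (U ++ ["."]).length := by simp
    rw [hlen1]
    rw [ih (U ++ ["."]) rest (fun c hc => hds c (by simp [hc])) hrest (by simp; omega)]
    simp

theorem packAux_dots (ds : List String) : ∀ (t : List String) (d o : Nat),
    (∀ c ∈ ds, c = ".") → packAux (ds ++ t) d o = packAux t (d + ds.length) o := by
  induction ds with
  | nil => intro t d o _; simp
  | cons c ds' ih =>
    intro t d o hds
    have hc : c = "." := hds c (by simp)
    subst hc
    rw [List.cons_append, packAux, if_pos rfl, ih t (d+1) o (fun c hc => hds c (by simp [hc]))]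
    congr 1
    simp; omega

theorem packAux_slide (U : List String) : ∀ (ds rest : List String) (d o : Nat),
    (∀ c ∈ ds, c = ".") →
    packAux (U ++ "O" :: (ds ++ rest)) d o = packAux (U ++ (ds ++ "O" :: rest)) d o := by
  induction U with
  | nil =>
    intro ds rest d o hds
    rw [List.nil_append, List.nil_append, packAux, if_neg (by decide), if_pos rfl,
      packAux_dots ds rest d (o+1) hds, packAux_dots ds ("O" :: rest) d o hds, packAux,
      if_neg (by decide), if_pos rfl]
  | cons c U' ih =>
    intro ds rest d o hds
    rw [List.cons_append, List.cons_append, packAux, packAux]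
    by_cases h1 : c = "."
    · rw [if_pos h1, if_pos h1, ih ds rest _ _ hds]
    · by_cases h2 : c = "O"
      · rw [if_neg h1, if_neg h1, if_pos h2, if_pos h2, ih ds rest _ _ hds]
      · rw [if_neg h1, if_neg h1, if_neg h2, if_neg h2, ih ds rest 0 0 hds]

theorem pvSettled_suffix (a : List String) : ∀ (b : List String), pvSettled (a ++ b) → pvSettled b := by
  induction a with
  | nil => intro b h; exact h
  | cons c a' ih => intro b h; exact ih b h.2

theorem pvSettled_short (l : List String) (h : l.length ≤ 1) : pvSettled l := by
  match l, h with
  | [], _ => trivial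
  | [x], _ => exact ⟨by rintro ⟨-, h2⟩; simp [List.headD] at h2, trivial⟩

theorem packAux_settled (P : List String) : ∀ (d o : Nat), pvSettled P →
    (o ≠ 0 → P.headD "" ≠ ".") →
    packAux P d o = List.replicate d "." ++ List.replicate o "O" ++ P := by
  induction P with
  | nil => intro d o _ _; simp [packAux]
  | cons c rest ih =>
    intro d o hset ho
    rw [packAux]
    by_cases h1 : c = "."
    · have ho0 : o = 0 := by
        by_contra hne
        exact ho hne (by simp [h1])
      subst ho0 h1
      rw [if_pos rfl, ih (d+1) 0 hset.2 (by simp)]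
      simp [List.replicate_succ']
    · by_cases h2 : c = "O"
      · subst h2
        rw [if_neg h1, if_pos rfl, ih d (o+1) hset.2
          (fun _ => fun hh => hset.1 ⟨rfl, by rwa [List.headD_eq_head?] at hh ⊢⟩)]
        rw [List.replicate_succ' (n := o)]
        simp
      · rw [if_neg h1, if_neg h2, ih 0 0 hset.2 (by simp)]
        simp

theorem pvSlidable_append (U : List String) : ∀ (l : List String),
    pvSlidable (U ++ l) = ((pvSlidable U && l.all (· == ".")) || pvSlidable l) := by
  induction U with
  | nil => intro l; simp [pvSlidable]
  | cons c U' ih =>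
    intro l
    rw [List.cons_append]
    show ((c == "O" && (U' ++ l).all (· == ".")) || pvSlidable (U' ++ l))
      = (((c == "O" && U'.all (· == ".")) || pvSlidable U') && l.all (· == ".") || pvSlidable l)
    rw [ih l, List.all_append]
    cases c == "O" <;> cases U'.all (· == ".") <;> cases l.all (· == ".") <;>
      cases pvSlidable U' <;> cases pvSlidable l <;> rfl

theorem allDots_not_slidable (l : List String) (h : l.all (· == ".") = true) :
    pvSlidable l = false := by
  induction l with
  | nil => rfl
  | cons c rest ih =>
    simp only [List.all_cons, Bool.and_eq_true] at h
    show ((c == "O" && rest.all (· == ".")) || pvSlidable rest) = false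
    have : c = "." := by simpa using h.1
    rw [this, ih h.2]
    rfl

theorem pvSettled_packed (ds : List String) : ∀ (rest : List String),
    (∀ c ∈ ds, c = ".") → rest.headD "" ≠ "." → pvSettled rest →
    pvSettled (ds ++ "O" :: rest) := by
  induction ds with
  | nil =>
    intro rest _ hrest hset
    exact ⟨by rintro ⟨-, h⟩; exact hrest h, hset⟩
  | cons c ds' ih =>
    intro rest hds hrest hset
    refine ⟨?_, ih rest (fun c hc => hds c (by simp [hc])) hrest hset⟩
    rintro ⟨hc, -⟩
    have : c = "." := hds c (by simp)
    simp [this] at hc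

theorem pvXLoop_core : ∀ (n : Nat) (P : List String) (w : Nat),
    (w = P.length ∨ (w = P.length + 1 ∧ pvSlidable P = false)) →
    pvSettled (P.drop n) →
    pvXLoop w n P = packAux P 0 0 := by
  intro n
  induction n with
  | zero =>
    intro P w _ hs
    rw [List.drop_zero] at hs
    rw [pvXLoop, packAux_settled P 0 0 hs (by simp)]
    simp
  | succ n ih =>
    intro P w hw hs
    rw [pvXLoop]
    by_cases hc : P.getD n "" = "O" ∧ P.getD (n+1) "" = "."
    · rw [if_pos hc]
      have hn1 : n + 1 < P.length := by
        by_contra hcon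
        have hdef : P.getD (n+1) "" = "" := List.getD_eq_default _ _ (by omega)
        rw [hdef] at hc
        exact absurd hc.2 (by decide)
      have hn : n < P.length := by omega
      -- opaque decomposition P = U ++ "O" :: (ds ++ rest)
      obtain ⟨U, hU, hPdec⟩ : ∃ U : List String, U.length = n ∧ P = U ++ "O" :: P.drop (n+1) := by
        refine ⟨P.take n, by simp; omega, ?_⟩
        conv_lhs => rw [← List.take_append_drop n P]
        rw [List.drop_eq_getElem_cons hn, ← List.getD_eq_getElem _ "" hn, hc.1]
      obtain ⟨ds, rest, hds, hrest, hdsrest⟩ :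
          ∃ ds rest : List String, (∀ c ∈ ds, c = ".") ∧ rest.headD "" ≠ "." ∧
            ds ++ rest = P.drop (n+1) := by
        refine ⟨(P.drop (n+1)).takeWhile (· == "."), (P.drop (n+1)).dropWhile (· == "."), ?_, ?_,
          List.takeWhile_append_dropWhile⟩
        · intro c hcm
          have := List.mem_takeWhile_imp hcm
          simpa using this
        · have h' := List.head?_dropWhile_not (· == ".") (P.drop (n+1))
          rw [List.headD_eq_head?]
          cases hh : ((P.drop (n+1)).dropWhile (· == ".")).head? with
          | none => simp
          | some x => rw [hh] at h'; simpa using h'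
      rw [← hdsrest] at hPdec
      have hsettled_l : pvSettled (ds ++ rest) := by rw [hdsrest]; exact hs
      have hlen : P.length = n + 1 + (ds.length + rest.length) := by
        have h1 : (P.drop (n+1)).length = P.length - (n+1) := List.length_drop
        have h2 : (ds ++ rest).length = ds.length + rest.length := List.length_append
        rw [hdsrest] at h2
        omega
      have hwlen : P.length ≤ w := by rcases hw with h | ⟨h, -⟩ <;> omega
      have hwhile : pvWhile w P n = U ++ ds ++ "O" :: rest := by
        conv_lhs => rw [hPdec, ← hU]
        rw [pvWhile_spec w ds U rest hds hrest (by omega)]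
      rw [hwhile]
      set P' := U ++ ds ++ "O" :: rest with hP'def
      have hP'assoc : P' = U ++ (ds ++ "O" :: rest) := by rw [hP'def, List.append_assoc]
      have hP'len : P'.length = P.length := by rw [hP'def]; simp; omega
      have hslide : packAux P' 0 0 = packAux P 0 0 := by
        rw [hP'assoc, ← packAux_slide U ds rest 0 0 hds, ← hPdec]
      have hset : pvSettled (P'.drop n) := by
        rw [hP'assoc, ← hU, List.drop_left]
        exact pvSettled_packed ds rest hds hrest (pvSettled_suffix ds rest hsettled_l)
      have hw' : w = P'.length ∨ (w = P'.length + 1 ∧ pvSlidable P' = false) := by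
        rcases hw with h | ⟨h, hslid⟩
        · left; omega
        · right
          refine ⟨by omega, ?_⟩
          rw [hPdec, pvSlidable_append] at hslid
          have hOall : ("O" :: (ds ++ rest)).all (· == ".") = false := by simp
          rw [hOall, Bool.and_false, Bool.false_or] at hslid
          rw [show pvSlidable ("O" :: (ds ++ rest)) =
              ((("O" : String) == "O" && (ds ++ rest).all (· == ".")) ||
                pvSlidable (ds ++ rest)) from rfl] at hslid
          simp only [beq_self_eq_true, Bool.true_and, Bool.or_eq_false_iff] at hslid
          obtain ⟨halll, hslidl⟩ := hslid
          have hdsall : ds.all (· == ".") = true := by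
            rw [List.all_eq_true]; intro c hcm; simp [hds c hcm]
          rw [List.all_append, hdsall, Bool.true_and] at halll
          rw [pvSlidable_append] at hslidl
          simp only [Bool.or_eq_false_iff] at hslidl
          rw [hP'assoc, pvSlidable_append, pvSlidable_append]
          have hOrest : ("O" :: rest).all (· == ".") = false := by simp
          rw [allDots_not_slidable ds hdsall, hOrest]
          rw [show pvSlidable ("O" :: rest) =
              ((("O" : String) == "O" && rest.all (· == ".")) || pvSlidable rest) from rfl]
          rw [halll, hslidl.2]
          simp
      rw [ih P' w hw' hset, hslide]
    · rw [if_neg hc]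
      apply ih P w hw
      by_cases hn : n < P.length
      · rw [List.drop_eq_getElem_cons hn]
        refine ⟨?_, hs⟩
        rintro ⟨h1, h2⟩
        rw [pvHeadD_drop] at h2
        exact hc ⟨by rw [List.getD_eq_getElem _ _ hn]; exact h1, h2⟩
      · rw [List.drop_eq_nil_of_le (by omega)]
        trivial

theorem pvRowB_single (c : String) : pvRowB [c] = [c] := by
  rw [pvRowB_eq_packAux, packAux]
  by_cases h1 : c = "."
  · rw [if_pos h1, packAux, h1]; rfl
  · by_cases h2 : c = "O"
    · rw [if_neg h1, if_pos h2, packAux, h2]; rfl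
    · rw [if_neg h1, if_neg h2, packAux]; rfl

theorem tilt_row (w : Nat) (row : List String)
    (h : w ≤ row.length ∨ w ≤ 1 ∨ (row.length + 1 = w ∧ pvSlidable row = false)) :
    pvXLoop w (w-1) row = pvRowB (row.take w) ++ row.drop w := by
  by_cases hw0 : w = 0
  · subst hw0
    show pvXLoop 0 0 row = pvRowB [] ++ row
    rw [pvXLoop]
    simp [pvRowB, pvFlush]
  rcases h with h | h | ⟨hlen, hslid⟩
  · -- w ≤ row.length : split off the untouched tail beyond width w
    have htk : (row.take w).length = w := by simp; omega
    conv_lhs => rw [← List.take_append_drop w row]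
    rw [pvXLoop_append w (w-1) (row.take w) (row.drop w) (by omega) htk,
      pvXLoop_core (w-1) (row.take w) w (Or.inl htk.symm)
        (pvSettled_short _ (by simp; omega)),
      pvRowB_eq_packAux]
  · -- w = 1 (w = 0 handled above)
    have hw1 : w = 1 := by omega
    subst hw1
    show pvXLoop 1 0 row = pvRowB (row.take 1) ++ row.drop 1
    rw [pvXLoop]
    cases row with
    | nil => simp [pvRowB, pvFlush]
    | cons c rest => simp [pvRowB_single]
  · -- the short unslidable row: the whole row is tilted, nothing is dropped
    have htk : row.take w = row := List.take_of_length_le (by omega)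
    have hdr : row.drop w = [] := List.drop_eq_nil_of_le (by omega)
    rw [htk, hdr, List.append_nil, pvRowB_eq_packAux]
    have : w - 1 = row.length := by omega
    rw [this]
    exact pvXLoop_core row.length row w (Or.inr ⟨by omega, hslid⟩)
      (by rw [List.drop_length]; trivial)


-- ===== VERDICT (by name: the statement is the Claim_ definition above) =====
theorem tilt_east_spec : Claim_equal_tilt_east := by
  intro grid _ hpre
  unfold Spec_tilt_east tilt_east tilt_east_alt
  exact List.map_congr_left (fun row hrow => tilt_row _ row (hpre row hrow))
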